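-- pv_equiv track=rewrite | github.com/evg-belousov/pain-scraper | src/collectors/indiehackers.py | _extract_challenges
-- ===== SOURCE A (Python) =====
-- def _extract_challenges(content: str) -> str:
--     """Extract challenges/struggles section."""
--
--     keywords = [
--         "biggest challenge",
--         "hardest part",
--         "struggle",
--         "obstacle",
--         "what went wrong",
--         "mistake",
--         "difficult",
--         "problem",
--     ]
--
--     lines = content.split("\n")
--     relevant_lines = []
--     capture = False
--     capture_count = 0
--
--     for line in lines:
--         line_lower = line.lower()
--
--         # Start capture if keyword found
--         if any(kw in line_lower for kw in keywords):
--             capture = True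
--             capture_count = 0
--
--         if capture:
--             relevant_lines.append(line)
--             capture_count += 1
--
--             # Capture 10 lines after keyword
--             if capture_count > 10:
--                 capture = False
--
--     return "\n".join(relevant_lines) if relevant_lines else ""
-- ===== SOURCE B (Python) =====
-- def _extract_challenges(content: str) -> str:
--     """Extract challenges/struggles section."""
--
--     keywords = [
--         "biggest challenge",
--         "hardest part",
--         "struggle",
--         "obstacle",
--         "what went wrong",
--         "mistake",
--         "difficult",
--         "problem",
--     ]
--
--     lines = content.split("\n")
--     hits = [i for i, line in enumerate(lines) if any(kw in line.lower() for kw in keywords)]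
--     return "\n".join(line for j, line in enumerate(lines) if any(i <= j <= i + 10 for i in hits))
-- ===== Notes on version B (the rewrite author's own statement) =====
-- stated objective: alternative
-- what changed: Replaces the capture-flag/countdown state machine with two passes: first collect the indices of keyword lines, then emit every line whose index lies in some inclusive window [i, i+10], joined with newlines.
import Mathlib
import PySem

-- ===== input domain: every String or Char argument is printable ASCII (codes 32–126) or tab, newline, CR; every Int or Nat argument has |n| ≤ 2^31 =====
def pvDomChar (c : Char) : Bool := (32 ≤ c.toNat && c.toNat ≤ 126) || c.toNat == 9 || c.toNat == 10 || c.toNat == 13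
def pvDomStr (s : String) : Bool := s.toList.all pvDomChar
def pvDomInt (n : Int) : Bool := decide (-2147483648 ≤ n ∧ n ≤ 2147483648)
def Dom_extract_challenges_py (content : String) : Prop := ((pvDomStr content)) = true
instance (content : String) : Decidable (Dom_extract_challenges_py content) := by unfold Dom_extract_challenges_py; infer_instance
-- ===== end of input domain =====

-- B replaces A's capture-flag/countdown state machine by a keyword-index pass plus a
-- window-coverage pass (alternative decomposition; same result, not claimed faster).

-- ===== PORT A =====
def pvKeywordsA : List String :=
  ["biggest challenge", "hardest part", "struggle", "obstacle",
   "what went wrong", "mistake", "difficult", "problem"]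

def extract_challenges_py (content : String) : String :=
  let lines := (PySem.Str.split? content "\n").getD []
  let res := lines.foldl
    (fun (st : List String × Bool × Int) line =>
      let line_lower := PySem.Str.lower line
      let st :=
        if pvKeywordsA.any (fun kw => PySem.Str.isIn kw line_lower) then
          (st.1, true, (0 : Int))
        else st
      if st.2.1 then
        let relevant := st.1 ++ [line]
        let count := st.2.2 + 1
        if count > 10 then (relevant, false, count) else (relevant, true, count)
      else st)
    (([], false, 0) : List String × Bool × Int)
  if res.1 ≠ [] then PySem.Str.join "\n" res.1 else ""

-- ===== PORT B =====
def pvKeywordsB : List String :=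
  ["biggest challenge", "hardest part", "struggle", "obstacle",
   "what went wrong", "mistake", "difficult", "problem"]

def extract_challenges_py_alt (content : String) : String :=
  let lines := (PySem.Str.split? content "\n").getD []
  let hits := ((PySem.List.enumerate lines 0).filter
      (fun p => pvKeywordsB.any (fun kw => PySem.Str.isIn kw (PySem.Str.lower p.2)))).map Prod.fst
  PySem.Str.join "\n"
    (((PySem.List.enumerate lines 0).filter
        (fun p => hits.any (fun i => decide (i ≤ p.1) && decide (p.1 ≤ i + 10)))).map Prod.snd)

-- ===== PRECONDITION & SPEC =====
def Spec_extract_challenges_py (content : String) (out : String) : Prop := out = extract_challenges_py_alt content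
instance (content : String) (out : String) : Decidable (Spec_extract_challenges_py content out) := by unfold Spec_extract_challenges_py; infer_instance

-- ===== CLAIM (what is proved, stated in full; the proofs are below) =====
def Claim_equal_extract_challenges_py : Prop := ∀ (content : String), Dom_extract_challenges_py content → Spec_extract_challenges_py content (extract_challenges_py content)

-- ===== LEMMAS AND PROOFS =====

-- the line-matching test both programs use
def pvHit (l : String) : Bool := pvKeywordsA.any (fun kw => PySem.Str.isIn kw (PySem.Str.lower l))

-- A's loop step, with the hit test abstracted
def pvStepA (st : List String × Bool × Int) (line : String) : List String × Bool × Int :=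
  let st := if pvHit line then (st.1, true, (0 : Int)) else st
  if st.2.1 then
    let relevant := st.1 ++ [line]
    let count := st.2.2 + 1
    if count > 10 then (relevant, false, count) else (relevant, true, count)
  else st

-- intermediate form: "r more lines still to be emitted from the current window"
def pvWindowed : List String → Nat → List String
  | [], _ => []
  | l :: t, r =>
    let r1 := if pvHit l then 11 else r
    (if 0 < r1 then [l] else []) ++ pvWindowed t (r1 - 1)

-- keyword-line indices of ls (B's first pass)
def pvHits (ls : List String) : List Int :=
  ((PySem.List.enumerate ls 0).filter (fun p => pvHit p.2)).map Prod.fst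

theorem pvWindowed_cons (l : String) (t : List String) (r : Nat) :
    pvWindowed (l :: t) r
      = (if 0 < (if pvHit l then 11 else r) then [l] else [])
          ++ pvWindowed t ((if pvHit l then 11 else r) - 1) := rfl

theorem pvStepA_hit (acc : List String) (c : Bool) (n : Int) (l : String) (h : pvHit l = true) :
    pvStepA (acc, c, n) l = (acc ++ [l], true, 1) := by norm_num [pvStepA, h]

theorem pvStepA_miss_off (acc : List String) (n : Int) (l : String) (h : pvHit l = false) :
    pvStepA (acc, false, n) l = (acc, false, n) := by simp [pvStepA, h]

theorem pvStepA_miss_on (acc : List String) (n : Int) (l : String) (h : pvHit l = false) :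
    pvStepA (acc, true, n) l
      = if n + 1 > 10 then (acc ++ [l], false, n + 1) else (acc ++ [l], true, n + 1) := by
  simp [pvStepA, h]

theorem pvEnumerate_shift {α : Type} (xs : List α) (s : Int) :
    PySem.List.enumerate xs (s + 1) = (PySem.List.enumerate xs s).map (fun p => (p.1 + 1, p.2)) := by
  induction xs generalizing s with
  | nil => simp [PySem.List.enumerate]
  | cons x t ih => simp [PySem.List.enumerate_cons, ih]

theorem pvHits_cons (l : String) (t : List String) :
    pvHits (l :: t) = (if pvHit l then [(0 : Int)] else []) ++ (pvHits t).map (· + 1) := by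
  unfold pvHits
  rw [PySem.List.enumerate_cons, show (0 : Int) + 1 = 0 + 1 from rfl, pvEnumerate_shift]
  rw [List.filter_cons, List.filter_map]
  cases pvHit l <;> simp [List.map_map, Function.comp_def]

theorem pvHits_nonneg (ls : List String) : ∀ i ∈ pvHits ls, 0 ≤ i := by
  intro i hi
  unfold pvHits at hi
  rcases List.mem_map.mp hi with ⟨p, hp, rfl⟩
  rcases (PySem.List.mem_enumerate_iff _ _ _).mp (List.mem_of_mem_filter hp) with ⟨k, hk, rfl⟩
  simp

theorem pvHits_any_cons (l : String) (t : List String) (f : Int → Bool) :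
    (pvHits (l :: t)).any f = ((pvHit l && f 0) || (pvHits t).any (fun i => f (i + 1))) := by
  rw [pvHits_cons]
  cases pvHit l <;> simp [List.any_map, Function.comp_def]

theorem pvFoldA_eq_windowed (ls : List String) : ∀ (acc : List String) (capture : Bool) (count : Int),
    (capture = true → 0 ≤ count ∧ count ≤ 10) →
    (List.foldl pvStepA (acc, capture, count) ls).1
      = acc ++ pvWindowed ls (if capture then (11 - count).toNat else 0) := by
  induction ls with
  | nil => intro acc capture count _; cases capture <;> simp [pvWindowed]
  | cons l t ih =>
    intro acc capture count hinv
    rw [List.foldl_cons, pvWindowed_cons]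
    cases h : pvHit l with
    | true =>
      rw [pvStepA_hit acc capture count l h, ih (acc ++ [l]) true 1 (by omega)]
      norm_num
      rfl
    | false =>
      cases capture with
      | false =>
        rw [pvStepA_miss_off acc count l h, ih acc false count hinv]
        norm_num
      | true =>
        rcases hinv rfl with ⟨h0, h10⟩
        rw [pvStepA_miss_on acc count l h]
        by_cases hc : count + 1 > 10
        · rw [if_pos hc, ih (acc ++ [l]) false (count + 1) (by intro hcon; exact absurd hcon (by simp))]
          have he : count = 10 := by omega
          subst he
          norm_num
        · rw [if_neg hc, ih (acc ++ [l]) true (count + 1) (by omega)]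
          have h1 : (0 : Nat) < (11 - count).toNat := by omega
          have h2 : (11 - (count + 1)).toNat = (11 - count).toNat - 1 := by omega
          simp [h1, h2]

theorem pvWindowed_eq_filter (ls : List String) : ∀ (r : Nat), r ≤ 11 →
    pvWindowed ls r
      = ((PySem.List.enumerate ls 0).filter
          (fun p => decide (p.1 < (r : Int))
            || (pvHits ls).any (fun i => decide (i ≤ p.1) && decide (p.1 ≤ i + 10)))).map Prod.snd := by
  induction ls with
  | nil => intro r _; simp [pvWindowed, PySem.List.enumerate]
  | cons l t ih =>
    intro r hr
    rw [pvWindowed_cons, PySem.List.enumerate_cons, show (0 : Int) + 1 = 0 + 1 from rfl,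
      pvEnumerate_shift, List.filter_cons, List.filter_map]
    have hhead : (decide ((0 : Int) < (r : Int))
        || (pvHits (l :: t)).any (fun i => decide (i ≤ (0 : Int)) && decide ((0 : Int) ≤ i + 10)))
        = decide (0 < (if pvHit l then 11 else r)) := by
      rw [pvHits_any_cons]
      have ht0 : (pvHits t).any (fun i => decide (i + 1 ≤ (0 : Int)) && decide ((0 : Int) ≤ i + 1 + 10)) = false := by
        rw [List.any_eq_false]
        intro i hi
        have := pvHits_nonneg t i hi
        simp
        omega
      rw [ht0]
      cases pvHit l <;> rw [Bool.eq_iff_iff] <;> simp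
    have htail : List.filter
          ((fun p : Int × String => decide (p.1 < (r : Int))
            || (pvHits (l :: t)).any (fun i => decide (i ≤ p.1) && decide (p.1 ≤ i + 10)))
            ∘ (fun p : Int × String => (p.1 + 1, p.2)))
          (PySem.List.enumerate t 0)
        = List.filter
          (fun p : Int × String => decide (p.1 < ((((if pvHit l then 11 else r) : Nat) - 1 : Nat) : Int))
            || (pvHits t).any (fun i => decide (i ≤ p.1) && decide (p.1 ≤ i + 10)))
          (PySem.List.enumerate t 0) := by
      apply List.filter_congr
      intro p hp
      have hp0 : (0 : Int) ≤ p.1 := by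
        rcases (PySem.List.mem_enumerate_iff _ _ _).mp hp with ⟨k, hk, rfl⟩
        simp
      simp only [Function.comp_apply]
      rw [pvHits_any_cons]
      have hany : (pvHits t).any (fun i => decide (i + 1 ≤ p.1 + 1) && decide (p.1 + 1 ≤ i + 1 + 10))
          = (pvHits t).any (fun i => decide (i ≤ p.1) && decide (p.1 ≤ i + 10)) := by
        refine List.any_congr rfl (fun i => ?_)
        congr 1
        · exact decide_eq_decide.mpr (by omega)
        · exact decide_eq_decide.mpr (by omega)
      rw [hany]
      cases hX : (pvHits t).any (fun i => decide (i ≤ p.1) && decide (p.1 ≤ i + 10)) with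
      | true => cases pvHit l <;> simp
      | false =>
        cases pvHit l <;> rw [Bool.eq_iff_iff] <;> simp <;> omega
    rw [htail, hhead]
    cases h : pvHit l with
    | true =>
      rw [show (if (true : Bool) = true then 11 else r) = 11 from rfl,
        show (11 - 1 : Nat) = 10 from rfl, ih 10 (by omega)]
      simp [List.map_map, Function.comp_def]
    | false =>
      rw [show (if (false : Bool) = true then 11 else r) = r from rfl, ih (r - 1) (by omega)]
      by_cases hr0 : 0 < r <;> simp [hr0, List.map_map, Function.comp_def]

-- ===== VERDICT (by name: the statement is the Claim_ definition above) =====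
theorem extract_challenges_py_spec : Claim_equal_extract_challenges_py := by
  intro content _
  show extract_challenges_py content = extract_challenges_py_alt content
  simp only [extract_challenges_py, extract_challenges_py_alt]
  generalize (PySem.Str.split? content "\n").getD [] = ls
  have hA : (List.foldl pvStepA (([], false, 0) : List String × Bool × Int) ls).1
      = pvWindowed ls 0 := by
    rw [pvFoldA_eq_windowed ls [] false 0 (by simp)]
    simp
  have hB : ((PySem.List.enumerate ls 0).filter
        (fun p => (pvHits ls).any (fun i => decide (i ≤ p.1) && decide (p.1 ≤ i + 10)))).map Prod.snd
      = pvWindowed ls 0 := by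
    rw [pvWindowed_eq_filter ls 0 (by omega)]
    congr 1
    apply List.filter_congr
    intro p hp
    have hp0 : (0 : Int) ≤ p.1 := by
      rcases (PySem.List.mem_enumerate_iff _ _ _).mp hp with ⟨k, hk, rfl⟩
      simp
    have hz : decide (p.1 < ((0 : Nat) : Int)) = false := by
      rw [decide_eq_false_iff_not]
      omega
    rw [hz, Bool.false_or]
  have hk : pvKeywordsB = pvKeywordsA := rfl
  rw [show (fun (st : List String × Bool × Int) line =>
      let line_lower := PySem.Str.lower line
      let st := if pvKeywordsA.any (fun kw => PySem.Str.isIn kw line_lower) then (st.1, true, (0 : Int)) else st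
      if st.2.1 then
        let relevant := st.1 ++ [line]
        let count := st.2.2 + 1
        if count > 10 then (relevant, false, count) else (relevant, true, count)
      else st) = pvStepA from rfl]
  rw [hA, hk]
  show _ = PySem.Str.join "\n" (((PySem.List.enumerate ls 0).filter
      (fun p => (pvHits ls).any (fun i => decide (i ≤ p.1) && decide (p.1 ≤ i + 10)))).map Prod.snd)
  rw [hB]
  by_cases hN : pvWindowed ls 0 = []
  · rw [hN]
    norm_num
    rfl
  · rw [if_pos hN]
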